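-- pv_equiv track=rewrite | github.com/thewooniverse/telegram_bots | practice/practice.py | parse_big_num
-- ===== SOURCE A (Python) =====
-- def parse_big_num(number):
--    """
--    parses a big number like 15486874 into 15M or B or etc... based on their length and returns it in strings like
--    15M, 8B, 1M, 500K etc...
--    the number is positive only
--    """
--
--    if number == 0:
--       return "NA"
--
--
--    categories = [(12, 'T'),
--                  (9, 'B'),
--                  (6, 'M'),
--                  (3, 'K')] # for anything less than 3 digits len(number)
--    digits = len(str(number))
--
--    for threshold, word in categories:
--       if digits > threshold:
--          cutoff_digit = int(str(number)[0:digits-threshold]) # pre-rounding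
--          # handle rounding
--          cutoff_plus1_digit = str(number)[0:digits-threshold+1]
--          last_digit_plus1 = int(cutoff_plus1_digit[-1])
--          if last_digit_plus1 >= 5:
--             cutoff_digit += 1
--
--          #return with rounding
--          return f'{cutoff_digit}{word}'
--    return f'{str(number)}'
-- ===== SOURCE B (Python) =====
-- def parse_big_num(number):
--     if number == 0:
--         return "NA"
--     s = str(number)
--     digits = len(s)
--     if digits <= 3:
--         return s
--     index = min((digits - 1) // 3, 4)
--     word = ['', 'K', 'M', 'B', 'T'][index]
--     threshold = index * 3
--     cutoff_digit = int(s[0:digits - threshold])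
--     if int(s[digits - threshold]) >= 5:
--         cutoff_digit += 1
--     return f'{cutoff_digit}{word}'
-- ===== Notes on version B (the rewrite author's own statement) =====
-- stated objective: simpler
-- what changed: The loop over the descending (threshold, suffix) category list is replaced by a closed-form magnitude index computed from the digit count (index = min((digits-1)//3, 4)), with the same string-slice extraction and half-up rounding.
import Mathlib
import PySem

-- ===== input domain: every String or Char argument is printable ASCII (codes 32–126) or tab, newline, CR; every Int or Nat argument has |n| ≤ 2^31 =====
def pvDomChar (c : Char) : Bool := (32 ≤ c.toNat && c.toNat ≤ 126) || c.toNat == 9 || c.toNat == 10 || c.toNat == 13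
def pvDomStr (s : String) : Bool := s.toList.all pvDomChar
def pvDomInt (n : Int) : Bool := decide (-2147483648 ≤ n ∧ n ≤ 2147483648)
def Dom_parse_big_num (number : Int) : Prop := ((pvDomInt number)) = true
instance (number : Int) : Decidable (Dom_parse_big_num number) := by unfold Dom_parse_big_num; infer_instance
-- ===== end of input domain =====

-- B replaces A's loop over the descending (threshold, suffix) list with a closed-form
-- magnitude index computed from the digit count (objective: simpler); the string-based
-- extraction and half-up rounding are kept, so the return values agree wherever A returns.

-- ===== PORT A =====
-- the for-loop over `categories`, returning from the first threshold exceeded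
def pvLoopA (number : Int) (digits : Int) : List (Int × List Char) → String
  | [] => PySem.Int.toStr number
  | (threshold, word) :: rest =>
    if threshold < digits then
      let s := (PySem.Int.toStr number).toList
      let cutoff_digit := (PySem.Int.ofChars? (PySem.List.slice s (some 0) (some (digits - threshold)))).getD 0
      let cutoff_plus1_digit := PySem.List.slice s (some 0) (some (digits - threshold + 1))
      let last_digit_plus1 := (PySem.Int.ofChars? (((PySem.List.pyGet? cutoff_plus1_digit (-1)).map (fun c => [c])).getD [])).getD 0
      let cutoff_digit := if 5 ≤ last_digit_plus1 then cutoff_digit + 1 else cutoff_digit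
      String.ofList (PySem.Int.toChars cutoff_digit ++ word)
    else pvLoopA number digits rest

def parse_big_num (number : Int) : String :=
  if number == 0 then "NA"
  else
    let categories : List (Int × List Char) := [(12, ['T']), (9, ['B']), (6, ['M']), (3, ['K'])]
    let digits : Int := (((PySem.Int.toStr number).toList).length : Int)
    pvLoopA number digits categories

-- ===== PORT B =====
def parse_big_num_alt (number : Int) : String :=
  if number == 0 then "NA"
  else
    let s := (PySem.Int.toStr number).toList
    let digits : Int := (s.length : Int)
    if digits ≤ 3 then PySem.Int.toStr number
    else
      let index := min (PySem.Int.floordiv (digits - 1) 3) 4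
      let word := (PySem.List.pyGet? [([] : List Char), ['K'], ['M'], ['B'], ['T']] index).getD []
      let threshold := index * 3
      let cutoff_digit := (PySem.Int.ofChars? (PySem.List.slice s (some 0) (some (digits - threshold)))).getD 0
      let first_dropped := (PySem.Int.ofChars? (((PySem.List.pyGet? s (digits - threshold)).map (fun c => [c])).getD [])).getD 0
      let cutoff_digit := if 5 ≤ first_dropped then cutoff_digit + 1 else cutoff_digit
      String.ofList (PySem.Int.toChars cutoff_digit ++ word)

-- ===== PRECONDITION & SPEC =====
-- Pre_ excludes only -999 ≤ number ≤ -100 (str(number) is '-' followed by three digits),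
-- where the Python A raises ValueError on int('-'); A returns on every admitted input.
def Pre_parse_big_num (number : Int) : Prop := number < -999 ∨ -100 < number
instance (number : Int) : Decidable (Pre_parse_big_num number) := by unfold Pre_parse_big_num; infer_instance
def pvWitness_parse_big_num : Int := (15486874)

def Spec_parse_big_num (number : Int) (out : String) : Prop := out = parse_big_num_alt number
instance (number : Int) (out : String) : Decidable (Spec_parse_big_num number out) := by unfold Spec_parse_big_num; infer_instance

-- ===== CLAIM (what is proved, stated in full; the proofs are below) =====
def Claim_equal_parse_big_num : Prop := ∀ (number : Int), Dom_parse_big_num number → Pre_parse_big_num number → Spec_parse_big_num number (parse_big_num number)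

-- ===== LEMMAS AND PROOFS =====

-- the last character of s[0:j+1] is s[j]
theorem pvLastChar (s : List Char) (j : Nat) (h : j + 1 ≤ s.length) :
    PySem.List.pyGet? (PySem.List.slice s (some 0) (some ((j:Int)+1))) (-1) = PySem.List.pyGet? s (j:Int) := by
  have h1 : ((j:Int)+1) = (((j+1:Nat)):Int) := by push_cast; ring
  rw [h1, PySem.List.slice_zero_start, PySem.List.slice_to_natCast]
  have hl : (s.take (j+1)).length = j+1 := by simp [h]
  simp [PySem.List.pyGet?, PySem.List.pyIdx?, hl]
  rw [if_pos (by omega)]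
  simp [List.getElem?_eq_getElem (by omega : j < s.length)]

theorem pv_main (number : Int) (h0 : ¬ number = 0) :
    parse_big_num number = parse_big_num_alt number := by
  simp only [parse_big_num, parse_big_num_alt, beq_iff_eq, if_neg h0, PySem.Int.toList_toStr]
  set d := (PySem.Int.toChars number).length with hd
  by_cases h3 : d ≤ 3
  · rw [if_pos (by omega)]
    simp only [pvLoopA]
    rw [if_neg (by omega), if_neg (by omega), if_neg (by omega), if_neg (by omega)]
  rw [if_neg (by omega)]
  rcases (by omega : d ≤ 6 ∨ (6 < d ∧ d ≤ 9) ∨ (9 < d ∧ d ≤ 12) ∨ 12 < d) with h | ⟨h, h'⟩ | ⟨h, h'⟩ | h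
  · have hfd : min (PySem.Int.floordiv ((d:Int) - 1) 3) 4 = 1 := by
      rw [show PySem.Int.floordiv ((d:Int) - 1) 3 = 1 by
        rw [PySem.Int.floordiv_eq_iff_of_pos (by omega)]; omega]
      decide
    simp only [pvLoopA, PySem.Int.toList_toStr, hfd,
      show ((PySem.List.pyGet? [([] : List Char), ['K'], ['M'], ['B'], ['T']] 1).getD []) = ['K'] from rfl,
      show (1:Int)*3 = 3 from rfl]
    rw [if_neg (by omega), if_neg (by omega), if_neg (by omega), if_pos (by omega)]
    rw [show ((d:Int) - 3) = (((d-3:Nat)):Int) by omega, pvLastChar _ (d-3) (by omega)]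
  · have hfd : min (PySem.Int.floordiv ((d:Int) - 1) 3) 4 = 2 := by
      rw [show PySem.Int.floordiv ((d:Int) - 1) 3 = 2 by
        rw [PySem.Int.floordiv_eq_iff_of_pos (by omega)]; omega]
      decide
    simp only [pvLoopA, PySem.Int.toList_toStr, hfd,
      show ((PySem.List.pyGet? [([] : List Char), ['K'], ['M'], ['B'], ['T']] 2).getD []) = ['M'] from rfl,
      show (2:Int)*3 = 6 from rfl]
    rw [if_neg (by omega), if_neg (by omega), if_pos (by omega)]
    rw [show ((d:Int) - 6) = (((d-6:Nat)):Int) by omega, pvLastChar _ (d-6) (by omega)]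
  · have hfd : min (PySem.Int.floordiv ((d:Int) - 1) 3) 4 = 3 := by
      rw [show PySem.Int.floordiv ((d:Int) - 1) 3 = 3 by
        rw [PySem.Int.floordiv_eq_iff_of_pos (by omega)]; omega]
      decide
    simp only [pvLoopA, PySem.Int.toList_toStr, hfd,
      show ((PySem.List.pyGet? [([] : List Char), ['K'], ['M'], ['B'], ['T']] 3).getD []) = ['B'] from rfl,
      show (3:Int)*3 = 9 from rfl]
    rw [if_neg (by omega), if_pos (by omega)]
    rw [show ((d:Int) - 9) = (((d-9:Nat)):Int) by omega, pvLastChar _ (d-9) (by omega)]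
  · have hfd : min (PySem.Int.floordiv ((d:Int) - 1) 3) 4 = 4 := by
      have : (4:Int) ≤ PySem.Int.floordiv ((d:Int) - 1) 3 := by
        rw [PySem.Int.le_floordiv_iff_mul_le (by omega)]; omega
      omega
    simp only [pvLoopA, PySem.Int.toList_toStr, hfd,
      show ((PySem.List.pyGet? [([] : List Char), ['K'], ['M'], ['B'], ['T']] 4).getD []) = ['T'] from rfl,
      show (4:Int)*3 = 12 from rfl]
    rw [if_pos (by omega)]
    rw [show ((d:Int) - 12) = (((d-12:Nat)):Int) by omega, pvLastChar _ (d-12) (by omega)]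

-- ===== VERDICT (by name: the statement is the Claim_ definition above) =====
theorem parse_big_num_spec : Claim_equal_parse_big_num := by
  intro number _ _
  unfold Spec_parse_big_num
  by_cases h0 : number = 0
  · subst h0; rfl
  · exact pv_main number h0
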